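-- pv_equiv track=rewrite | github.com/MapleMaelstrom/MapleWeight | individual_weights/farming.py | crop_upgrade_weight
-- ===== SOURCE A (Python) =====
-- def crop_upgrade_weight(garden_data):
--     upgrades = garden_data.get("crop_upgrade_levels", {})
--     score = 0
--
--     for crop, level in upgrades.items():
--         for i in range(3, level + 1, 2):  # Odd levels only starting at 3
--             score += 1
--         if level >= 8:
--             score += 1  # Level 8 bonus
--
--     breakdown = f"Crop Upgrade Weight +{score}"
--     return score, breakdown
-- ===== SOURCE B (Python) =====
-- def _crop_score(level):
--     # Closed form: the odd levels 3,5,...,level number (level-1)//2; plus level-8 bonus.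
--     if level < 3:
--         return 0
--     base = (level - 1) // 2
--     return base + 1 if level >= 8 else base
--
--
-- def _total(levels):
--     if not levels:
--         return 0
--     return _crop_score(levels[0]) + _total(levels[1:])
--
--
-- def crop_upgrade_weight(garden_data):
--     levels = list(garden_data.get("crop_upgrade_levels", {}).values())
--     score = _total(levels)
--     return score, "Crop Upgrade Weight +" + str(score)
-- ===== Notes on version B (the rewrite author's own statement) =====
-- stated objective: alternative
-- what changed: Replaces A's nested accumulator loops by structural recursion over the list of levels with a per-crop closed form (level-1)//2 (+ level>=8 bonus) instead of counting the range(3, level+1, 2) one by one.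
import Mathlib
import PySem

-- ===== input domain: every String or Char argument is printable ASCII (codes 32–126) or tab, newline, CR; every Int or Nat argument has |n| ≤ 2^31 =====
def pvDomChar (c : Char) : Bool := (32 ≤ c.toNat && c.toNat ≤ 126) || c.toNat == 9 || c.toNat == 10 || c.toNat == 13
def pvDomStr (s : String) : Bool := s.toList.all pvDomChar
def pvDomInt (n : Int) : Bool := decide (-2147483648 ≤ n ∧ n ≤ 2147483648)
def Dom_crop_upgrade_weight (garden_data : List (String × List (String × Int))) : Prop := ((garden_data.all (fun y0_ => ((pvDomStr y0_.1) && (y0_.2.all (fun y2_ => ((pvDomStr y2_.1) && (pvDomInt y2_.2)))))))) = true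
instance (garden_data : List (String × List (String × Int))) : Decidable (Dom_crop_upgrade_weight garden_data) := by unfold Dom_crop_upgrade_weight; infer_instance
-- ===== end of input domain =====

-- B replaces A's nested counting loops by structural recursion with a per-crop closed form (level-1)//2 (alternative algorithm; same measured cost on the test inputs).


-- ===== PORT A =====
def crop_upgrade_weight (garden_data : List (String × List (String × Int))) : Int × String :=
  let upgrades := (PySem.Dict.mk garden_data).getD "crop_upgrade_levels" []
  let score : Int := upgrades.foldl (fun score kv =>
      let score := (PySem.List.pyRange 3 (kv.2 + 1) 2).foldl (fun s _ => s + 1) score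
      if kv.2 ≥ 8 then score + 1 else score) 0
  let breakdown := "Crop Upgrade Weight +" ++ PySem.Int.toStr score
  (score, breakdown)

-- ===== PORT B =====
-- _crop_score from Source B
def pvCropScore (level : Int) : Int :=
  if level < 3 then 0
  else
    let base := PySem.Int.floordiv (level - 1) 2
    if level ≥ 8 then base + 1 else base

-- _total from Source B: structural recursion over the list of levels
def pvTotal : List Int → Int
  | [] => 0
  | l :: rest => pvCropScore l + pvTotal rest

def crop_upgrade_weight_alt (garden_data : List (String × List (String × Int))) : Int × String :=
  let levels := ((PySem.Dict.mk garden_data).getD "crop_upgrade_levels" []).map (·.2)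
  let score := pvTotal levels
  (score, "Crop Upgrade Weight +" ++ PySem.Int.toStr score)

-- ===== PRECONDITION & SPEC =====
def Spec_crop_upgrade_weight (garden_data : List (String × List (String × Int))) (out : Int × String) : Prop := out = crop_upgrade_weight_alt garden_data
instance (garden_data : List (String × List (String × Int))) (out : Int × String) : Decidable (Spec_crop_upgrade_weight garden_data out) := by unfold Spec_crop_upgrade_weight; infer_instance

-- ===== CLAIM (what is proved, stated in full; the proofs are below) =====
def Claim_equal_crop_upgrade_weight : Prop := ∀ (garden_data : List (String × List (String × Int))), Dom_crop_upgrade_weight garden_data → Spec_crop_upgrade_weight garden_data (crop_upgrade_weight garden_data)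

-- ===== LEMMAS AND PROOFS =====

-- counting loop adds the range's length
theorem foldl_count (xs : List Int) (s : Int) :
    xs.foldl (fun s _ => s + 1) s = s + xs.length := by
  induction xs generalizing s with
  | nil => simp
  | cons x xs ih => simp [List.foldl, ih]; omega

-- per-crop closed form: the inner loop counts the odd levels, equal to pvCropScore minus the bonus
theorem per_level (l s : Int) :
    (PySem.List.pyRange 3 (l + 1) 2).foldl (fun s _ => s + 1) s
      = s + (if l < 3 then 0 else PySem.Int.floordiv (l - 1) 2) := by
  rw [foldl_count, PySem.List.pyRange_of_pos 3 (l + 1) (by norm_num)]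
  simp only [List.length_map, List.length_range]
  by_cases h : l < 3
  · have h3 : ¬ (3 : Int) < l + 1 := by omega
    simp [h3, h]
  · have h3 : (3 : Int) < l + 1 := by omega
    have hq : PySem.Int.floordiv (l - 1) 2 = (l - 1) / 2 := by
      rw [PySem.Int.floordiv_eq_iff_of_pos (by norm_num)]; omega
    simp only [if_pos h3, if_neg h, hq]
    omega

-- A's fold over the pairs equals B's recursion over the mapped levels
theorem fold_eq_total (ups : List (String × Int)) (s : Int) :
    ups.foldl (fun score kv =>
        let score := (PySem.List.pyRange 3 (kv.2 + 1) 2).foldl (fun s _ => s + 1) score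
        if kv.2 ≥ 8 then score + 1 else score) s
      = s + pvTotal (ups.map (·.2)) := by
  induction ups generalizing s with
  | nil => simp [pvTotal]
  | cons kv ups ih =>
    simp only [List.foldl_cons, List.map_cons, pvTotal]
    rw [ih]
    unfold pvCropScore
    by_cases h8 : kv.2 ≥ 8
    · have h3 : ¬ kv.2 < 3 := by omega
      simp [h3, h8, per_level]; omega
    · by_cases h3 : kv.2 < 3 <;> simp [h3, h8, per_level] <;> omega

-- ===== VERDICT (by name: the statement is the Claim_ definition above) =====
theorem crop_upgrade_weight_spec : Claim_equal_crop_upgrade_weight := by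
  intro garden_data _
  unfold Spec_crop_upgrade_weight crop_upgrade_weight crop_upgrade_weight_alt
  simp only [fold_eq_total, zero_add]
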